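-- pv_equiv track=rewrite | github.com/YertayGreatest/Web-Dev | webDev_lab 7/wd_lab_7_first_task/CodingBat/string-2.py | cat_dog
-- ===== SOURCE A (Python) =====
-- def cat_dog(str):
--   catcnt = 0
--   dogcnt = 0
--   for i in range(len(str)-1):
--     if str[i:i+3] == 'cat':
--       catcnt+=1
--     elif str[i:i+3] == 'dog':
--       dogcnt+=1
--   return catcnt==dogcnt
-- ===== SOURCE B (Python) =====
-- def cat_dog(str):
--   return len(str.split('cat')) == len(str.split('dog'))
-- ===== Notes on version B (the rewrite author's own statement) =====
-- stated objective: simpler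
-- what changed: Replaces the manual indexed scan with two branched counters by splitting the string on each pattern and comparing the part counts (occurrences = parts - 1).
import Mathlib
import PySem

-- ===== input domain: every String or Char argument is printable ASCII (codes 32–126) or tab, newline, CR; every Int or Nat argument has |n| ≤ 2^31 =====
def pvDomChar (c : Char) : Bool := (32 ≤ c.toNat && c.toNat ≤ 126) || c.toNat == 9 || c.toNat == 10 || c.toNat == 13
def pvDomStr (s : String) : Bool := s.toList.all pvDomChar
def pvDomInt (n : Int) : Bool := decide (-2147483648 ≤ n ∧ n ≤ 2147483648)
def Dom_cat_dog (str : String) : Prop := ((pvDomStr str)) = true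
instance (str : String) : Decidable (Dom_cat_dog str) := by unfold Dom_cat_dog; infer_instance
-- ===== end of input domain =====

-- B replaces A's single indexed scan with two branched counters by splitting the
-- string on each pattern and comparing the part counts (simpler decomposition).

-- ===== PORT A =====
def cat_dog (str : String) : Bool :=
  let r := (PySem.List.pyRange 0 (PySem.Str.len str - 1) 1).foldl
    (fun (st : Int × Int) i =>
      if PySem.Str.slice str (some i) (some (i + 3)) == "cat" then (st.1 + 1, st.2)
      else if PySem.Str.slice str (some i) (some (i + 3)) == "dog" then (st.1, st.2 + 1)
      else st)
    (0, 0)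
  r.1 == r.2

-- ===== PORT B =====
-- str.split('cat') with a nonempty literal separator is the sep ≠ "" split form
def cat_dog_alt (str : String) : Bool :=
  (PySem.Chars.splitOn str.toList "cat".toList).length
    == (PySem.Chars.splitOn str.toList "dog".toList).length

-- ===== PRECONDITION & SPEC =====
def Spec_cat_dog (str : String) (out : Bool) : Prop := out = cat_dog_alt str
instance (str : String) (out : Bool) : Decidable (Spec_cat_dog str out) := by unfold Spec_cat_dog; infer_instance

-- ===== CLAIM (what is proved, stated in full; the proofs are below) =====
def Claim_equal_cat_dog : Prop := ∀ (str : String), Dom_cat_dog str → Spec_cat_dog str (cat_dog str)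

-- ===== LEMMAS AND PROOFS =====

-- positional count: number of indices i with cs[i:i+3] = sub (for |sub| = 3)
def pvPC (sub : List Char) : List Char → Nat
  | [] => 0
  | c :: t => (if List.take 3 (c :: t) = sub then 1 else 0) + pvPC sub t

def pvCAT : List Char := ['c', 'a', 't']
def pvDOG : List Char := ['d', 'o', 'g']

def pvStep (st : Int × Int) (u : List Char) : Int × Int :=
  if u = pvCAT then (st.1 + 1, st.2) else if u = pvDOG then (st.1, st.2 + 1) else st

def pvScan (st : Int × Int) : List Char → Int × Int
  | [] => st
  | c :: t => pvScan (pvStep st (List.take 3 (c :: t))) t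

lemma pvScan_eq_pc : ∀ (cs : List Char) (st : Int × Int),
    pvScan st cs = (st.1 + (pvPC pvCAT cs : Int), st.2 + (pvPC pvDOG cs : Int)) := by
  intro cs
  induction cs with
  | nil => intro st; simp [pvScan, pvPC]
  | cons c t ih =>
    intro st
    rw [show pvScan st (c :: t) = pvScan (pvStep st (List.take 3 (c :: t))) t from rfl, ih]
    by_cases h1 : List.take 3 (c :: t) = pvCAT
    · have hd : List.take 3 (c :: t) ≠ pvDOG := by rw [h1]; decide
      simp only [pvStep, pvPC, if_pos h1, if_neg hd, Prod.mk.injEq]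
      constructor <;> push_cast <;> ring
    · by_cases h2 : List.take 3 (c :: t) = pvDOG
      · simp only [pvStep, pvPC, if_pos h2, if_neg h1, Prod.mk.injEq]
        constructor <;> push_cast <;> ring
      · simp only [pvStep, pvPC, if_neg h1, if_neg h2, Prod.mk.injEq]
        constructor <;> push_cast <;> ring

lemma pvFold_eq_scan : ∀ (cs : List Char) (st : Int × Int),
    (List.range cs.length).foldl (fun s k => pvStep s (List.take 3 (List.drop k cs))) st
      = pvScan st cs := by
  intro cs
  induction cs with
  | nil => intro st; simp [pvScan]
  | cons c t ih =>
    intro st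
    simp only [List.length_cons]
    rw [List.range_succ_eq_map]
    simp only [List.foldl_cons, List.foldl_map, List.drop_zero, List.drop_succ_cons]
    exact ih _

-- the fueled split loop counts separators: one output piece per match, plus one
lemma pvGo_len (sep : List Char) (hlen : sep.length = 3)
    (hstep : ∀ l : List Char, sep.isPrefixOf l = true →
      pvPC sep l = 1 + pvPC sep (List.drop 3 l)) :
    ∀ (fuel : Nat) (l cur : List Char) (acc : List (List Char)), l.length < fuel →
      (PySem.Chars.splitOn.go sep fuel l cur acc).length = acc.length + 1 + pvPC sep l := by
  intro fuel
  induction fuel with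
  | zero => intro l cur acc h; omega
  | succ f ih =>
    intro l cur acc h
    cases l with
    | nil => simp [PySem.Chars.splitOn.go, pvPC]
    | cons c rest =>
      rw [PySem.Chars.splitOn.go]
      by_cases hp : sep.isPrefixOf (c :: rest) = true
      · have h3 : 3 ≤ (c :: rest).length := by
          have := (List.isPrefixOf_iff_prefix.mp hp).length_le
          omega
        have hdl : (List.drop 3 (c :: rest)).length = (c :: rest).length - 3 := by simp
        rw [if_pos hp, hlen,
          ih _ _ _ (by rw [hdl]; simp only [List.length_cons] at h h3 ⊢; omega),
          hstep _ hp]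
        simp only [List.length_cons]
        omega
      · have hne : List.take 3 (c :: rest) ≠ sep := by
          intro he
          apply hp
          apply List.isPrefixOf_iff_prefix.mpr
          rw [← he]
          exact List.take_prefix 3 _
        rw [if_neg hp, ih _ _ _ (by simp only [List.length_cons] at h ⊢; omega)]
        simp only [pvPC, if_neg hne]
        omega

lemma pvPC_cat_step : ∀ l : List Char, pvCAT.isPrefixOf l = true →
    pvPC pvCAT l = 1 + pvPC pvCAT (List.drop 3 l) := by
  intro l hp
  obtain ⟨r, rfl⟩ := List.isPrefixOf_iff_prefix.mp hp
  simp [pvCAT, pvPC, List.take]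

lemma pvPC_dog_step : ∀ l : List Char, pvDOG.isPrefixOf l = true →
    pvPC pvDOG l = 1 + pvPC pvDOG (List.drop 3 l) := by
  intro l hp
  obtain ⟨r, rfl⟩ := List.isPrefixOf_iff_prefix.mp hp
  simp [pvDOG, pvPC, List.take]

lemma pvSplit_len (cs : List Char) :
    (PySem.Chars.splitOn cs pvCAT).length = 1 + pvPC pvCAT cs ∧
    (PySem.Chars.splitOn cs pvDOG).length = 1 + pvPC pvDOG cs := by
  constructor
  · rw [PySem.Chars.splitOn,
      pvGo_len pvCAT (by decide) pvPC_cat_step _ _ _ _ (by omega)]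
    simp
  · rw [PySem.Chars.splitOn,
      pvGo_len pvDOG (by decide) pvPC_dog_step _ _ _ _ (by omega)]
    simp

-- a 3-slice at the last position has length ≤ 2 and matches neither pattern
lemma pvStep_short (st : Int × Int) (u : List Char) (h : u.length ≤ 2) :
    pvStep st u = st := by
  unfold pvStep
  rw [if_neg, if_neg]
  · intro he; rw [he] at h; simp [pvDOG] at h
  · intro he; rw [he] at h; simp [pvCAT] at h

-- ===== VERDICT (by name: the statement is the Claim_ definition above) =====
theorem cat_dog_spec : Claim_equal_cat_dog := by
  intro str _
  unfold Spec_cat_dog cat_dog cat_dog_alt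
  have hcat : ("cat" : String).toList = pvCAT := by decide
  have hdog : ("dog" : String).toList = pvDOG := by decide
  rw [hcat, hdog]
  set cs := str.toList with hcs
  -- rewrite A's loop body into pvStep on take-3 windows
  have hbody : ∀ (st : Int × Int) (i : Int),
      (if PySem.Str.slice str (some i) (some (i + 3)) == "cat" then (st.1 + 1, st.2)
       else if PySem.Str.slice str (some i) (some (i + 3)) == "dog" then (st.1, st.2 + 1)
       else st)
      = pvStep st (PySem.List.slice cs (some i) (some (i + 3))) := by
    intro st i
    unfold pvStep
    have h1 : (PySem.Str.slice str (some i) (some (i + 3)) == "cat")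
        = decide (PySem.List.slice cs (some i) (some (i + 3)) = pvCAT) := by
      rw [Bool.eq_iff_iff]
      simp only [beq_iff_eq, decide_eq_true_eq]
      constructor
      · intro h; rw [← hcat]
        have := congrArg String.toList h
        simpa [PySem.Str.slice] using this
      · intro h
        apply String.ext
        simpa [PySem.Str.slice, hcat] using h
    have h2 : (PySem.Str.slice str (some i) (some (i + 3)) == "dog")
        = decide (PySem.List.slice cs (some i) (some (i + 3)) = pvDOG) := by
      rw [Bool.eq_iff_iff]
      simp only [beq_iff_eq, decide_eq_true_eq]
      constructor
      · intro h; rw [← hdog]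
        have := congrArg String.toList h
        simpa [PySem.Str.slice] using this
      · intro h
        apply String.ext
        simpa [PySem.Str.slice, hdog] using h
    rw [h1, h2]
    by_cases hA : PySem.List.slice cs (some i) (some (i + 3)) = pvCAT <;>
      by_cases hB : PySem.List.slice cs (some i) (some (i + 3)) = pvDOG <;>
      simp [hA, hB]
  simp only [hbody]
  have hlen : PySem.Str.len str = (cs.length : Int) := by
    simp [PySem.Str.len_eq, hcs]
  rw [hlen]
  -- reduce A's fold over range(len-1) to pvScan over cs
  have hA : ((PySem.List.pyRange 0 ((cs.length : Int) - 1) 1).foldl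
      (fun (st : Int × Int) i => pvStep st (PySem.List.slice cs (some i) (some (i + 3))))
      (0, 0)) = pvScan (0, 0) cs := by
    cases cs with
    | nil => simp [PySem.List.pyRange_one_eq_nil (by omega : (-1 : Int) ≤ 0), pvScan]
    | cons c t =>
      have hn : ((c :: t).length : Int) - 1 = (t.length : Int) := by simp
      rw [hn]
      have hfull : ∀ st : Int × Int,
          ((PySem.List.pyRange 0 ((c :: t).length : Int) 1).foldl
            (fun (st : Int × Int) i => pvStep st (PySem.List.slice (c :: t) (some i) (some (i + 3)))) st)
          = pvScan st (c :: t) := by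
        intro st
        rw [PySem.List.pyRange_zero_nat, List.foldl_map]
        rw [← pvFold_eq_scan]
        apply PySem.List.foldl_congr_mem
        intro b k hk
        have : ((k : Int) + 3) = ((k + 3 : Nat) : Int) := by push_cast; ring
        rw [this, PySem.List.slice_natCast]
        norm_num
      have hsplit : PySem.List.pyRange 0 (((c :: t).length : Nat) : Int) 1
          = PySem.List.pyRange 0 ((t.length : Int)) 1 ++ [(t.length : Int)] := by
        have : (((c :: t).length : Nat) : Int) = (t.length : Int) + 1 := by simp
        rw [this, PySem.List.pyRange_one_succ_right (by positivity)]
      have := hfull (0, 0)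
      rw [hsplit, List.foldl_append] at this
      simp only [List.foldl_cons, List.foldl_nil] at this
      rw [← this]
      have hshort : PySem.List.slice (c :: t) (some (t.length : Int))
          (some ((t.length : Int) + 3)) = List.take 3 (List.drop t.length (c :: t)) := by
        have : ((t.length : Int) + 3) = ((t.length + 3 : Nat) : Int) := by push_cast; ring
        rw [this, PySem.List.slice_natCast]
        norm_num
      rw [hshort, pvStep_short]
      rw [List.length_take, List.length_drop]
      simp only [List.length_cons]
      omega
  rw [hA, pvScan_eq_pc]
  obtain ⟨e1, e2⟩ := pvSplit_len cs
  rw [e1, e2]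
  show (0 + (pvPC pvCAT cs : Int) == 0 + (pvPC pvDOG cs : Int))
      = ((1 + pvPC pvCAT cs) == (1 + pvPC pvDOG cs))
  rw [Bool.eq_iff_iff]
  simp only [beq_iff_eq]
  omega
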